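-- pv_equiv track=rewrite | github.com/asj412-cpu/GrokEmpire | tests/test_tiered_cooldown.py | find_entries_tiered_cooldown
-- ===== SOURCE A (Python) =====
-- def find_entries_tiered_cooldown(ticks, max_contracts=3, cooldown_sec=60):
--     """Returns list of entry ticks for a single ticker with tiered window + cooldown"""
--     ticks_sorted = sorted(ticks, key=lambda x: x['cycle_sec'])
--     entries = []
--     last_buy_sec = -999
--     for t in ticks_sorted:
--         if len(entries) >= max_contracts:
--             break
--         cs = t['cycle_sec']
--         ask = t['yes_ask']
--         # Cooldown check
--         if cs - last_buy_sec < cooldown_sec: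
--             continue
--         # Tier check
--         if cs <= 420 and 1 <= ask <= 20:
--             entries.append(t)
--             last_buy_sec = cs
--         elif 420 < cs <= 600 and 20 <= ask <= 49:
--             entries.append(t)
--             last_buy_sec = cs
--     return entries
-- ===== SOURCE B (Python) =====
-- def find_entries_tiered_cooldown(ticks, max_contracts=3, cooldown_sec=60):
--     """Pick-by-pick search: repeatedly scan the remaining sorted suffix for the FIRST
--     tick passing the cooldown and tier tests, take it and continue on the suffix
--     after it, until max_contracts picks or no candidate remains."""
--     pool = sorted(ticks, key=lambda t: t['cycle_sec'])
--
--     def next_pick(pool, last):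
--         for j, t in enumerate(pool):
--             cs = t['cycle_sec']
--             if cs - last >= cooldown_sec:
--                 ask = t['yes_ask']
--                 if (cs <= 420 and 1 <= ask <= 20) or (420 < cs <= 600 and 20 <= ask <= 49):
--                     return t, pool[j + 1:]
--         return None
--
--     entries = []
--     last_buy_sec = -999
--     remaining = max_contracts
--     while remaining > 0:
--         found = next_pick(pool, last_buy_sec)
--         if found is None:
--             break
--         t, pool = found
--         entries.append(t)
--         last_buy_sec = t['cycle_sec']
--         remaining -= 1
--     return entries
-- ===== Notes on version B (the rewrite author's own statement) =====
-- stated objective: alternative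
-- what changed: Instead of one pass with inline tier/cooldown branches mutating loop state, B selects entries pick by pick: an inner search function returns the first candidate of the remaining sorted suffix (cooldown and tier tested together) plus the suffix after it, and an outer loop repeats that search until max_contracts picks or no candidate is found.
import Mathlib
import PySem

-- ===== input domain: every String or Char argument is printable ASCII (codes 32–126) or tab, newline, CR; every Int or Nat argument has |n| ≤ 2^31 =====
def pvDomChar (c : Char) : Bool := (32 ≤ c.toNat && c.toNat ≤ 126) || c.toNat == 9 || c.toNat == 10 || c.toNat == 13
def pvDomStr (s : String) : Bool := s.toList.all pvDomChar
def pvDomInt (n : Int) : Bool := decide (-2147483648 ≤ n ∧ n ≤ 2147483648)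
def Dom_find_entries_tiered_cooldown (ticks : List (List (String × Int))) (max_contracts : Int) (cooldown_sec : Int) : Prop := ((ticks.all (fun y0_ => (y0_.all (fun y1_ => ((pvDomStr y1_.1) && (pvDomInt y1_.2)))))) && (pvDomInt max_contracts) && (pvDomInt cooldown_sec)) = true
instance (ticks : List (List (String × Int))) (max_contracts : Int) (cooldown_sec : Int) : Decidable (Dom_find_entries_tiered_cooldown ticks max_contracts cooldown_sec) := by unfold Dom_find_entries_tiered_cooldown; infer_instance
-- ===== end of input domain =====

-- ===== PORT A =====
-- B replaces A's single stateful scan by a repeated search-for-next-candidate; equal on all inputs whose ticks carry both keys.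
-- t['cycle_sec'] / t['yes_ask']: first-match lookup; default 0 is reached only outside Pre_ (where Python A raises KeyError)
def pvGet (t : List (String × Int)) (k : String) : Int :=
  PySem.Dict.getD (PySem.Dict.mk t) k 0

def pvLoopA (max_contracts cooldown_sec : Int) :
    List (List (String × Int)) → List (List (String × Int)) → Int → List (List (String × Int))
  | [], entries, _ => entries
  | t :: rest, entries, last_buy_sec =>
    if (entries.length : Int) ≥ max_contracts then entries
    else
      let cs := pvGet t "cycle_sec"
      let ask := pvGet t "yes_ask"
      if cs - last_buy_sec < cooldown_sec then pvLoopA max_contracts cooldown_sec rest entries last_buy_sec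
      else if cs ≤ 420 ∧ 1 ≤ ask ∧ ask ≤ 20 then
        pvLoopA max_contracts cooldown_sec rest (entries ++ [t]) cs
      else if 420 < cs ∧ cs ≤ 600 ∧ 20 ≤ ask ∧ ask ≤ 49 then
        pvLoopA max_contracts cooldown_sec rest (entries ++ [t]) cs
      else pvLoopA max_contracts cooldown_sec rest entries last_buy_sec

def find_entries_tiered_cooldown (ticks : List (List (String × Int))) (max_contracts : Int) (cooldown_sec : Int) : List (List (String × Int)) :=
  pvLoopA max_contracts cooldown_sec
    (PySem.List.sorted ticks (fun t => pvGet t "cycle_sec") false) [] (-999)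

-- ===== PORT B =====
-- the candidate test of Source B's next_pick: cooldown, then tier
def pvCand (cd last : Int) (t : List (String × Int)) : Bool :=
  decide (pvGet t "cycle_sec" - last ≥ cd) &&
    ((decide (pvGet t "cycle_sec" ≤ 420) && decide (1 ≤ pvGet t "yes_ask") && decide (pvGet t "yes_ask" ≤ 20)) ||
     (decide (420 < pvGet t "cycle_sec") && decide (pvGet t "cycle_sec" ≤ 600) && decide (20 ≤ pvGet t "yes_ask") && decide (pvGet t "yes_ask" ≤ 49)))

-- next_pick: first candidate of the pool together with the suffix after it
def pvNextPick (cd last : Int) :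
    List (List (String × Int)) → Option ((List (String × Int)) × List (List (String × Int)))
  | [] => none
  | t :: rest => if pvCand cd last t then some (t, rest) else pvNextPick cd last rest

theorem pvNextPick_length (cd last : Int) (pool : List (List (String × Int)))
    (t : List (String × Int)) (rest : List (List (String × Int)))
    (h : pvNextPick cd last pool = some (t, rest)) : rest.length < pool.length := by
  induction pool with
  | nil => simp [pvNextPick] at h
  | cons u us ih =>
    by_cases hc : pvCand cd last u = true
    · simp [pvNextPick, hc] at h
      simp [h.2.symm]
    · simp [pvNextPick, hc] at h
      have := ih h
      simp
      omega

-- the outer while loop of Source B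
def pvPick (cd : Int) (pool : List (List (String × Int))) (last remaining : Int) :
    List (List (String × Int)) :=
  if remaining ≤ 0 then []
  else
    match h : pvNextPick cd last pool with
    | none => []
    | some (t, rest) => t :: pvPick cd rest (pvGet t "cycle_sec") (remaining - 1)
termination_by pool.length
decreasing_by exact pvNextPick_length cd last pool t rest h

def find_entries_tiered_cooldown_alt (ticks : List (List (String × Int))) (max_contracts : Int) (cooldown_sec : Int) : List (List (String × Int)) :=
  pvPick cooldown_sec
    (PySem.List.sorted ticks (fun t => pvGet t "cycle_sec") false) (-999) max_contracts

-- ===== PRECONDITION & SPEC =====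
-- Pre_ excludes inputs where a tick lacks the key 'cycle_sec', or lacks 'yes_ask' while max_contracts > 0: Python A
-- raises KeyError on almost all of them (when max_contracts <= 0 it breaks before reading any tick, so only 'cycle_sec',
-- read by the sort, is required); a tick reached only after A breaks may lack 'yes_ask' with A still returning.
def Pre_find_entries_tiered_cooldown (ticks : List (List (String × Int))) (max_contracts : Int) (cooldown_sec : Int) : Prop :=
  (∀ t ∈ ticks, (PySem.Dict.mk t).contains "cycle_sec" = true) ∧
  (max_contracts ≤ 0 ∨ ∀ t ∈ ticks, (PySem.Dict.mk t).contains "yes_ask" = true)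
instance (ticks : List (List (String × Int))) (max_contracts : Int) (cooldown_sec : Int) : Decidable (Pre_find_entries_tiered_cooldown ticks max_contracts cooldown_sec) := by unfold Pre_find_entries_tiered_cooldown; infer_instance

def pvWitness_find_entries_tiered_cooldown : (List (List (String × Int))) × Int × Int :=
  ([[("cycle_sec", 100), ("yes_ask", 5)], [("cycle_sec", 500), ("yes_ask", 30)]], 3, 60)

def Spec_find_entries_tiered_cooldown (ticks : List (List (String × Int))) (max_contracts : Int) (cooldown_sec : Int) (out : List (List (String × Int))) : Prop := out = find_entries_tiered_cooldown_alt ticks max_contracts cooldown_sec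
instance (ticks : List (List (String × Int))) (max_contracts : Int) (cooldown_sec : Int) (out : List (List (String × Int))) : Decidable (Spec_find_entries_tiered_cooldown ticks max_contracts cooldown_sec out) := by unfold Spec_find_entries_tiered_cooldown; infer_instance

-- ===== CLAIM (what is proved, stated in full; the proofs are below) =====
def Claim_equal_find_entries_tiered_cooldown : Prop := ∀ (ticks : List (List (String × Int))) (max_contracts : Int) (cooldown_sec : Int), Dom_find_entries_tiered_cooldown ticks max_contracts cooldown_sec → Pre_find_entries_tiered_cooldown ticks max_contracts cooldown_sec → Spec_find_entries_tiered_cooldown ticks max_contracts cooldown_sec (find_entries_tiered_cooldown ticks max_contracts cooldown_sec)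

-- ===== LEMMAS AND PROOFS =====
theorem pvCand_iff (cd last : Int) (t : List (String × Int)) :
    pvCand cd last t = true ↔
      (pvGet t "cycle_sec" - last ≥ cd ∧
        ((pvGet t "cycle_sec" ≤ 420 ∧ 1 ≤ pvGet t "yes_ask" ∧ pvGet t "yes_ask" ≤ 20) ∨
         (420 < pvGet t "cycle_sec" ∧ pvGet t "cycle_sec" ≤ 600 ∧ 20 ≤ pvGet t "yes_ask" ∧ pvGet t "yes_ask" ≤ 49))) := by
  simp only [pvCand, Bool.and_eq_true, Bool.or_eq_true, decide_eq_true_eq]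
  tauto

-- A's scan over the sorted list equals 'acc ++ repeated next_pick': a tick A skips (cooldown or tier
-- failure) is exactly a non-candidate pvNextPick also skips, and a tick A takes is the first candidate.
theorem pvPick_step (cd last r : Int) (t : List (String × Int)) (pool : List (List (String × Int)))
    (hr : ¬ r ≤ 0) :
    pvPick cd (t :: pool) last r =
      if pvCand cd last t then t :: pvPick cd pool (pvGet t "cycle_sec") (r - 1)
      else pvPick cd pool last r := by
  have hnp : pvNextPick cd last (t :: pool) =
      if pvCand cd last t then some (t, pool) else pvNextPick cd last pool := rfl
  rw [pvPick, if_neg hr]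
  by_cases hc : pvCand cd last t = true
  · rw [if_pos hc]
    split
    next heq => rw [hnp, if_pos hc] at heq; exact absurd heq (by simp)
    next t1 rest1 heq =>
      rw [hnp, if_pos hc] at heq
      cases heq
      rfl
  · rw [if_neg hc, pvPick, if_neg hr]
    split
    next heq =>
      rw [hnp, if_neg hc] at heq
      split
      next => rfl
      next t1 rest1 heq2 => rw [heq] at heq2; exact absurd heq2 (by simp)
    next t1 rest1 heq =>
      rw [hnp, if_neg hc] at heq
      split
      next heq2 => rw [heq] at heq2; exact absurd heq2 (by simp)
      next t2 rest2 heq2 =>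
        rw [heq] at heq2
        cases heq2
        rfl

theorem pvLoopA_eq_pvPick (mc cd : Int) (l : List (List (String × Int)))
    (acc : List (List (String × Int))) (last : Int) :
    pvLoopA mc cd l acc last = acc ++ pvPick cd l last (mc - acc.length) := by
  induction l generalizing acc last with
  | nil =>
    rw [pvLoopA, pvPick]
    by_cases h : mc - (acc.length : Int) ≤ 0
    · simp [h]
    · rw [if_neg h,
        show pvNextPick cd last ([] : List (List (String × Int))) = none from rfl]
      simp
  | cons t rest ih =>
    by_cases hfull : (acc.length : Int) ≥ mc
    · have hk : mc - (acc.length : Int) ≤ 0 := by omega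
      rw [pvLoopA]
      simp only [hfull, if_pos]
      rw [pvPick]
      simp [hk]
    · have hk : ¬ (mc - (acc.length : Int) ≤ 0) := by omega
      rw [pvLoopA, pvPick_step cd last _ t rest hk]
      simp only [hfull, if_neg, not_false_eq_true]
      by_cases hcool : pvGet t "cycle_sec" - last < cd
      · have hc : ¬ pvCand cd last t = true := by
          rw [pvCand_iff]; omega
        simp only [hcool, if_pos, hc, if_neg]
        exact ih acc last
      · simp only [hcool, if_neg, not_false_eq_true]
        by_cases h1 : pvGet t "cycle_sec" ≤ 420 ∧ 1 ≤ pvGet t "yes_ask" ∧ pvGet t "yes_ask" ≤ 20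
        · have hc : pvCand cd last t = true := (pvCand_iff cd last t).mpr ⟨by omega, Or.inl h1⟩
          rw [if_pos h1, if_pos hc, ih (acc ++ [t]) (pvGet t "cycle_sec"),
            show mc - ((acc ++ [t]).length : Int) = mc - acc.length - 1 by simp; omega]
          simp
        · rw [if_neg h1]
          by_cases h2 : 420 < pvGet t "cycle_sec" ∧ pvGet t "cycle_sec" ≤ 600 ∧ 20 ≤ pvGet t "yes_ask" ∧ pvGet t "yes_ask" ≤ 49
          · have hc : pvCand cd last t = true := (pvCand_iff cd last t).mpr ⟨by omega, Or.inr h2⟩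
            rw [if_pos h2, if_pos hc, ih]
            simp only [List.length_append, List.length_cons, List.length_nil, List.append_assoc,
              List.singleton_append]
            congr 2
            push_cast
            ring
          · have hc : ¬ pvCand cd last t = true := by
              rw [pvCand_iff]
              rintro ⟨-, h | h⟩
              exacts [h1 h, h2 h]
            rw [if_neg h2, if_neg hc]
            exact ih acc last

-- ===== VERDICT (by name: the statement is the Claim_ definition above) =====
theorem find_entries_tiered_cooldown_spec : Claim_equal_find_entries_tiered_cooldown := by
  intro ticks mc cd _ _
  unfold Spec_find_entries_tiered_cooldown find_entries_tiered_cooldown find_entries_tiered_cooldown_alt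
  rw [pvLoopA_eq_pvPick]
  norm_num
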